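-- pv_equiv track=rewrite | github.com/edycutjong/edycutjong-ai-agents | code-quality/regex-tester/agent/tester.py | explain_pattern
-- ===== SOURCE A (Python) =====
-- def explain_pattern(pattern: str) -> list[str]:
--     """Generate a simple explanation of regex components."""
--     explanations = {
--         r"\d": "digit (0-9)",
--         r"\w": "word character (a-z, A-Z, 0-9, _)",
--         r"\s": "whitespace",
--         r"\b": "word boundary",
--         r".": "any character",
--         r"*": "zero or more",
--         r"+": "one or more",
--         r"?": "zero or one (optional)",
--         r"^": "start of string/line",
--         r"$": "end of string/line",
--         r"|": "OR",
--         r"[": "character class start",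
--         r"]": "character class end",
--         r"(": "group start",
--         r")": "group end",
--         r"{": "quantifier start",
--         r"}": "quantifier end",
--     }
--
--     parts = []
--     i = 0
--     while i < len(pattern):
--         # Check two-char sequences first
--         if i + 1 < len(pattern) and pattern[i] == "\\":
--             two = pattern[i:i+2]
--             if two in explanations:
--                 parts.append(f"`{two}` → {explanations[two]}")
--                 i += 2
--                 continue
--             parts.append(f"`{two}` → escaped character '{pattern[i+1]}'")
--             i += 2
--             continue
--
--         char = pattern[i]
--         if char in explanations:
--             parts.append(f"`{char}` → {explanations[char]}")
--         elif char.isalnum():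
--             parts.append(f"`{char}` → literal '{char}'")
--         i += 1
--
--     return parts
-- ===== SOURCE B (Python) =====
-- def explain_pattern(pattern: str) -> list[str]:
--     """Two-pass version: tokenize the pattern into escape/single tokens, then format each token."""
--     notes = {
--         r"\d": "digit (0-9)",
--         r"\w": "word character (a-z, A-Z, 0-9, _)",
--         r"\s": "whitespace",
--         r"\b": "word boundary",
--         r".": "any character",
--         r"*": "zero or more",
--         r"+": "one or more",
--         r"?": "zero or one (optional)",
--         r"^": "start of string/line",
--         r"$": "end of string/line",
--         r"|": "OR",
--         r"[": "character class start",
--         r"]": "character class end",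
--         r"(": "group start",
--         r")": "group end",
--         r"{": "quantifier start",
--         r"}": "quantifier end",
--     }
--
--     # pass 1: segmentation
--     tokens = []
--     rest = pattern
--     while rest:
--         k = 2 if rest[0] == "\\" and len(rest) > 1 else 1
--         tokens.append(rest[:k])
--         rest = rest[k:]
--
--     # pass 2: formatting
--     parts = []
--     for tok in tokens:
--         if len(tok) == 2:
--             parts.append(f"`{tok}` → " + notes.get(tok, f"escaped character '{tok[1]}'"))
--         elif tok in notes:
--             parts.append(f"`{tok}` → {notes[tok]}")
--         elif tok.isalnum():
--             parts.append(f"`{tok}` → literal '{tok}'")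
--     return parts
-- ===== Notes on version B (the rewrite author's own statement) =====
-- stated objective: alternative
-- what changed: Replaced the single index-driven while loop that interleaves scanning and formatting with two separate passes: a tokenizer that splits the pattern into escape/single-character tokens, then a formatting loop over the token list.
import Mathlib
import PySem

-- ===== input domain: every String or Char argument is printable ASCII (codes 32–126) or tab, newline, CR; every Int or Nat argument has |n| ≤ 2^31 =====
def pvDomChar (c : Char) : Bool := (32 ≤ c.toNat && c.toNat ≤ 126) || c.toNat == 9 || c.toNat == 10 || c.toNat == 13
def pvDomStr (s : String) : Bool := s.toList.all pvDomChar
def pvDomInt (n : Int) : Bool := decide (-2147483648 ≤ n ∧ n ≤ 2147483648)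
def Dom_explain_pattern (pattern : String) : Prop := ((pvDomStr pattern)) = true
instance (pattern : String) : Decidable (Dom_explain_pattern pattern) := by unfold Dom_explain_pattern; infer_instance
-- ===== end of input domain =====

-- B restructures A's single interleaved index loop into two passes (tokenize, then format); objective: alternative decomposition, same cost.

-- the literal `explanations` dict of the Python source, shared by both ports (lookup = membership test + value)
def expl? : List Char → Option String
  | ['\\', 'd'] => some "digit (0-9)"
  | ['\\', 'w'] => some "word character (a-z, A-Z, 0-9, _)"
  | ['\\', 's'] => some "whitespace"
  | ['\\', 'b'] => some "word boundary"
  | ['.'] => some "any character"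
  | ['*'] => some "zero or more"
  | ['+'] => some "one or more"
  | ['?'] => some "zero or one (optional)"
  | ['^'] => some "start of string/line"
  | ['$'] => some "end of string/line"
  | ['|'] => some "OR"
  | ['['] => some "character class start"
  | [']'] => some "character class end"
  | ['('] => some "group start"
  | [')'] => some "group end"
  | ['{'] => some "quantifier start"
  | ['}'] => some "quantifier end"
  | _ => none

-- ===== PORT A =====
-- A's while loop over the index, interleaving scanning and formatting; c.isalnum → PySem.Chars.isalnum (exact on the ASCII domain)
def expA : List Char → List String
  | [] => []
  | [c] =>
    match expl? [c] with
    | some e => ["`" ++ String.mk [c] ++ "` → " ++ e]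
    | none => if PySem.Chars.isalnum c then ["`" ++ String.mk [c] ++ "` → literal '" ++ String.mk [c] ++ "'"] else []
  | c :: d :: rest =>
    if c = '\\' then
      (match expl? [c, d] with
       | some e => "`" ++ String.mk [c, d] ++ "` → " ++ e
       | none => "`" ++ String.mk [c, d] ++ "` → escaped character '" ++ String.mk [d] ++ "'") :: expA rest
    else
      match expl? [c] with
      | some e => ("`" ++ String.mk [c] ++ "` → " ++ e) :: expA (d :: rest)
      | none =>
        if PySem.Chars.isalnum c then ("`" ++ String.mk [c] ++ "` → literal '" ++ String.mk [c] ++ "'") :: expA (d :: rest)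
        else expA (d :: rest)

def explain_pattern (pattern : String) : List String := expA pattern.toList

-- ===== PORT B =====
-- pass 1 of Source B: split the pattern into escape (2-char) / single-char tokens
def tokenizeB : List Char → List (List Char)
  | [] => []
  | [c] => [[c]]
  | c :: d :: rest => if c = '\\' then [c, d] :: tokenizeB rest else [c] :: tokenizeB (d :: rest)

-- pass 2 of Source B: format one token (none = the token produces no output line)
def fmtB : List Char → Option String
  | [a, b] => some ("`" ++ String.mk [a, b] ++ "` → " ++ (expl? [a, b]).getD ("escaped character '" ++ String.mk [b] ++ "'"))
  | [c] =>
    match expl? [c] with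
    | some e => some ("`" ++ String.mk [c] ++ "` → " ++ e)
    | none => if PySem.Chars.isalnum c then some ("`" ++ String.mk [c] ++ "` → literal '" ++ String.mk [c] ++ "'") else none
  | _ => none

def explain_pattern_alt (pattern : String) : List String :=
  (tokenizeB pattern.toList).filterMap fmtB

-- ===== PRECONDITION & SPEC =====
def Spec_explain_pattern (pattern : String) (out : List String) : Prop := out = explain_pattern_alt pattern
instance (pattern : String) (out : List String) : Decidable (Spec_explain_pattern pattern out) := by unfold Spec_explain_pattern; infer_instance

-- ===== CLAIM (what is proved, stated in full; the proofs are below) =====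
def Claim_equal_explain_pattern : Prop := ∀ (pattern : String), Dom_explain_pattern pattern → Spec_explain_pattern pattern (explain_pattern pattern)

-- ===== LEMMAS AND PROOFS =====
theorem expA_eq (l : List Char) : expA l = (tokenizeB l).filterMap fmtB := by
  have lit : ∀ t : String, "` → " ++ ("escaped character '" ++ t) = "` → escaped character '" ++ t := by
    intro t
    rw [← String.append_assoc,
      show ("` → " ++ "escaped character '" : String) = "` → escaped character '" from by decide]
  match l with
  | [] => rfl
  | [c] =>
    cases h : expl? [c]
    · simp only [expA, tokenizeB, List.filterMap, fmtB, h]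
      by_cases ha : PySem.Chars.isalnum c <;> simp [ha]
    · simp [expA, tokenizeB, List.filterMap, fmtB, h]
  | c :: d :: rest =>
    have ih1 := expA_eq rest
    have ih2 := expA_eq (d :: rest)
    by_cases hc : c = '\\'
    · subst hc
      simp only [expA, tokenizeB, fmtB, ih1]
      cases h : expl? ['\\', d] <;>
        simp [h, Option.getD, String.append_assoc, lit]
    · simp only [expA, tokenizeB, if_neg hc, List.filterMap_cons, ih2]
      cases h : expl? [c]
      · simp only [fmtB, h]
        by_cases ha : PySem.Chars.isalnum c <;> simp [ha]
      · simp [fmtB, h]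
termination_by l.length

-- ===== VERDICT (by name: the statement is the Claim_ definition above) =====
theorem explain_pattern_spec : Claim_equal_explain_pattern := by
  intro p _
  unfold Spec_explain_pattern explain_pattern explain_pattern_alt
  exact expA_eq p.toList
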